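-- pv_equiv track=rewrite | github.com/Imwm82/desloppify | desloppify/engine/detectors/test_coverage/_issue_generation.py | _build_test_importer_index
-- ===== SOURCE A (Python) =====
-- def _build_test_importer_index(
--     parsed_imports_by_test: dict[str, set[str]],
-- ) -> dict[str, set[str]]:
--     """Build a reverse index: production_file -> set of test files that import it."""
--     index: dict[str, set[str]] = {}
--     for test_path, prod_files in parsed_imports_by_test.items():
--         for prod_file in prod_files:
--             index.setdefault(prod_file, set()).add(test_path)
--     return index
-- ===== SOURCE B (Python) =====
-- def _build_test_importer_index(
--     parsed_imports_by_test: dict[str, set[str]],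
-- ) -> dict[str, set[str]]:
--     """Reverse index built by a per-production-file scan over all tests."""
--     prod_files = list(dict.fromkeys(
--         p for fs in parsed_imports_by_test.values() for p in fs))
--     return {
--         p: {t for t, fs in parsed_imports_by_test.items() if p in fs}
--         for p in prod_files
--     }
-- ===== Notes on version B (the rewrite author's own statement) =====
-- stated objective: alternative
-- what changed: Replaces A's single incremental setdefault-accumulation pass with a two-phase inverted traversal: first collect the deduplicated list of production files, then build each index entry by scanning all tests for importers.
import Mathlib
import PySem

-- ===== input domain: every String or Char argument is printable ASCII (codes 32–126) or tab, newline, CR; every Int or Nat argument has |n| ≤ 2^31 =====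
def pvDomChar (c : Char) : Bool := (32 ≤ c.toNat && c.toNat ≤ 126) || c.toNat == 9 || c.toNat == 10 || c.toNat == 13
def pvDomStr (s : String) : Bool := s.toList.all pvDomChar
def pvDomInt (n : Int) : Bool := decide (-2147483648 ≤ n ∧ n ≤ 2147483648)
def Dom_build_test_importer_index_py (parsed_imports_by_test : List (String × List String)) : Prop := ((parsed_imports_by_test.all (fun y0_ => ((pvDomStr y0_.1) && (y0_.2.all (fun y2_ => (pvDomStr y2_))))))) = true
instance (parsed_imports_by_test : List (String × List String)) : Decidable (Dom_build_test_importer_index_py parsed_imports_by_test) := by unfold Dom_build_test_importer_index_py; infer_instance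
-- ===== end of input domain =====

-- B inverts the traversal (per-production-file scans instead of incremental setdefault accumulation); same result, similar cost.

-- ===== PORT A =====
def build_test_importer_index_py (parsed_imports_by_test : List (String × List String)) : List (String × List String) :=
  (parsed_imports_by_test.foldl
    (fun index tf =>
      tf.2.foldl
        (fun index prod_file =>
          index.modify prod_file [] (fun s => PySem.Set.add s tf.1))
        index)
    PySem.Dict.empty).items

-- ===== PORT B =====
def build_test_importer_index_py_alt (parsed_imports_by_test : List (String × List String)) : List (String × List String) :=
  let prod_files := PySem.List.dedup (parsed_imports_by_test.flatMap (·.2))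
  prod_files.map (fun p =>
    (p, PySem.Set.ofList
          ((parsed_imports_by_test.filter (fun tf => decide (p ∈ tf.2))).map (·.1))))

-- ===== PRECONDITION & SPEC =====
def Spec_build_test_importer_index_py (parsed_imports_by_test : List (String × List String)) (out : List (String × List String)) : Prop := out = build_test_importer_index_py_alt parsed_imports_by_test
instance (parsed_imports_by_test : List (String × List String)) (out : List (String × List String)) : Decidable (Spec_build_test_importer_index_py parsed_imports_by_test out) := by unfold Spec_build_test_importer_index_py; infer_instance

-- ===== CLAIM (what is proved, stated in full; the proofs are below) =====
def Claim_equal_build_test_importer_index_py : Prop := ∀ (parsed_imports_by_test : List (String × List String)), Dom_build_test_importer_index_py parsed_imports_by_test → Spec_build_test_importer_index_py parsed_imports_by_test (build_test_importer_index_py parsed_imports_by_test)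

-- ===== LEMMAS AND PROOFS =====

theorem inner_getD (l : List String) (t : String)
    (d : PySem.Dict String (List String)) (q : String) :
    (l.foldl (fun d p => d.modify p [] (fun s => PySem.Set.add s t)) d).getD q []
      = if q ∈ l then PySem.Set.add (d.getD q []) t else d.getD q [] := by
  induction l generalizing d with
  | nil => simp
  | cons a l ih =>
    simp only [List.foldl_cons, ih, PySem.Dict.getD_modify, List.mem_cons]
    by_cases hq : q = a <;> simp [hq]

theorem outer_getD (xs : List (String × List String))
    (d : PySem.Dict String (List String)) (q : String) :
    (xs.foldl (fun index tf => tf.2.foldl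
        (fun index prod_file => index.modify prod_file [] (fun s => PySem.Set.add s tf.1)) index) d).getD q []
      = PySem.Set.update (d.getD q []) ((xs.filter (fun tf => decide (q ∈ tf.2))).map (·.1)) := by
  induction xs generalizing d with
  | nil => simp [PySem.Set.update]
  | cons a xs ih =>
    simp only [List.foldl_cons, ih, inner_getD, List.filter_cons]
    by_cases hq : q ∈ a.2 <;> simp [hq, PySem.Set.update]

theorem outer_keys (xs : List (String × List String))
    (d : PySem.Dict String (List String)) :
    (xs.foldl (fun index tf => tf.2.foldl
        (fun index prod_file => index.modify prod_file [] (fun s => PySem.Set.add s tf.1)) index) d).keys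
      = PySem.Set.update d.keys (xs.flatMap (·.2)) := by
  induction xs generalizing d with
  | nil => simp [PySem.Set.update]
  | cons a xs ih =>
    simp only [List.foldl_cons, ih, PySem.Dict.keys_foldl_modify, List.flatMap_cons,
      PySem.Set.update, List.foldl_append]

-- ===== VERDICT (by name: the statement is the Claim_ definition above) =====
theorem build_test_importer_index_py_spec : Claim_equal_build_test_importer_index_py := by
  intro xs _
  unfold Spec_build_test_importer_index_py build_test_importer_index_py build_test_importer_index_py_alt
  have hkeys := outer_keys xs PySem.Dict.empty
  simp only [PySem.Dict.keys_empty, PySem.Set.update_nil_left] at hkeys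
  have hnd : (xs.foldl (fun index tf => tf.2.foldl
      (fun index prod_file => index.modify prod_file [] (fun s => PySem.Set.add s tf.1)) index)
      PySem.Dict.empty).keys.Nodup := by
    rw [hkeys]; exact PySem.Set.nodup_ofList _
  rw [PySem.Dict.items_eq_map_keys _ hnd [], hkeys, PySem.List.dedup_eq_ofList]
  apply List.map_congr_left
  intro k _
  rw [outer_getD]
  simp [PySem.Set.update_nil_left]
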